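-- pv_equiv track=rewrite | github.com/SlimTekDev/ProxyForge | ProxyForge/army_book_ui.py | get_systems_and_armies
-- ===== SOURCE A (Python) =====
-- SYSTEM_LABELS = {
--     "grimdark-future": "Grimdark Future",
--     "grimdark-future-firefight": "Grimdark Future: Firefight",
--     "age-of-fantasy": "Age of Fantasy",
--     "age-of-fantasy-skirmish": "Age of Fantasy: Skirmish",
--     "age-of-fantasy-regiments": "Age of Fantasy: Regiments",
-- }
--
-- def get_systems_and_armies(data):
--     """Return (systems, system_to_armies). systems = sorted list; system_to_armies = {slug: [army1, army2, ...]}."""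
--     system_to_armies = {}
--     for entry in data:
--         if not isinstance(entry, dict):
--             continue
--         sys_slug = entry.get("system") or "grimdark-future"
--         army = entry.get("army") or "Unknown"
--         if sys_slug not in system_to_armies:
--             system_to_armies[sys_slug] = set()
--         system_to_armies[sys_slug].add(army)
--     # Sort armies per system, and system order by label
--     for k in system_to_armies:
--         system_to_armies[k] = sorted(system_to_armies[k])
--     systems = sorted(system_to_armies.keys(), key=lambda s: SYSTEM_LABELS.get(s, s))
--     return systems, system_to_armies
-- ===== SOURCE B (Python) =====
-- SYSTEM_LABELS = {
--     "grimdark-future": "Grimdark Future",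
--     "grimdark-future-firefight": "Grimdark Future: Firefight",
--     "age-of-fantasy": "Age of Fantasy",
--     "age-of-fantasy-skirmish": "Age of Fantasy: Skirmish",
--     "age-of-fantasy-regiments": "Age of Fantasy: Regiments",
-- }
--
--
-- def _insert_sorted_unique(xs, x):
--     """Return xs (a strictly sorted list) with x inserted at its sorted position; no-op if present."""
--     if not xs:
--         return [x]
--     h = xs[0]
--     if x < h:
--         return [x] + xs
--     if x == h:
--         return xs
--     return [h] + _insert_sorted_unique(xs[1:], x)
--
--
-- def get_systems_and_armies(data):
--     """Return (systems, system_to_armies). systems = sorted list; system_to_armies = {slug: [army1, army2, ...]}."""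
--     system_to_armies = {}
--     for entry in data:
--         if not isinstance(entry, dict):
--             continue
--         sys_slug = entry.get("system") or "grimdark-future"
--         army = entry.get("army") or "Unknown"
--         system_to_armies[sys_slug] = _insert_sorted_unique(
--             system_to_armies.get(sys_slug, []), army)
--     systems = sorted(system_to_armies, key=lambda s: SYSTEM_LABELS.get(s, s))
--     return systems, system_to_armies
-- ===== Notes on version B (the rewrite author's own statement) =====
-- stated objective: alternative
-- what changed: A groups armies into per-system sets and then re-walks the dict sorting each set; B does a single pass that keeps each system's army list sorted and duplicate-free via ordered insertion, with no sets and no second sorting pass.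
import Mathlib
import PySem

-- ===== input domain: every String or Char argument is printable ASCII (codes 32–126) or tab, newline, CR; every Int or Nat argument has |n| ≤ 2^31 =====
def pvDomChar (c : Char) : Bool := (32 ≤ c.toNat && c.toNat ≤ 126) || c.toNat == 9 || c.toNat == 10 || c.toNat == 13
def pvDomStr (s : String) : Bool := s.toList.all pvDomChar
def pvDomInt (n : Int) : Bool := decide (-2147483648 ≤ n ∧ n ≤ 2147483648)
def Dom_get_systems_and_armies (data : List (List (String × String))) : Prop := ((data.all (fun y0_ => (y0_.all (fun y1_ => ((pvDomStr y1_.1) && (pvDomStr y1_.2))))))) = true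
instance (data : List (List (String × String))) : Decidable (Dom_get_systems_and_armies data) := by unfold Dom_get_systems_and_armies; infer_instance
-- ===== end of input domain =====

-- B replaces A's dict-of-sets plus a second sorting pass by a single pass that keeps each
-- system's army list sorted and duplicate-free via ordered insertion (objective: alternative).

-- shared module constant
def SYSTEM_LABELS : PySem.Dict String String := PySem.Dict.ofList
  [("grimdark-future", "Grimdark Future"),
   ("grimdark-future-firefight", "Grimdark Future: Firefight"),
   ("age-of-fantasy", "Age of Fantasy"),
   ("age-of-fantasy-skirmish", "Age of Fantasy: Skirmish"),
   ("age-of-fantasy-regiments", "Age of Fantasy: Regiments")]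

-- `entry.get(k) or dflt` : a missing key or an empty string falls back to the default
def pvOr (o : Option String) (dflt : String) : String :=
  match o with
  | none => dflt
  | some s => if s = "" then dflt else s

def pvSlug (entry : List (String × String)) : String :=
  pvOr ((PySem.Dict.ofList entry).get? "system") "grimdark-future"

def pvArmy (entry : List (String × String)) : String :=
  pvOr ((PySem.Dict.ofList entry).get? "army") "Unknown"

-- ===== PORT A =====
-- every entry is a dict by type, so the `isinstance(entry, dict)` guard is always true
def get_systems_and_armies (data : List (List (String × String))) : List String × (List (String × List String)) :=
  let d := data.foldl
    (fun d entry =>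
      PySem.Dict.modify d (pvSlug entry) PySem.Set.empty (fun s => PySem.Set.add s (pvArmy entry)))
    PySem.Dict.empty
  -- `for k in system_to_armies: system_to_armies[k] = sorted(system_to_armies[k])`
  let d2 := d.keys.foldl
    (fun acc k => acc.insert k (PySem.List.sorted (acc.getD k []) (fun x => x) false)) d
  let systems := PySem.List.sorted d2.keys (fun s => SYSTEM_LABELS.getD s s) false
  (systems, d2.items)

-- ===== PORT B =====
def insertSortedUnique (xs : List String) (x : String) : List String :=
  match xs with
  | [] => [x]
  | h :: t => if x < h then x :: h :: t else if x = h then h :: t else h :: insertSortedUnique t x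

def get_systems_and_armies_alt (data : List (List (String × String))) : List String × (List (String × List String)) :=
  let d := data.foldl
    (fun d entry =>
      PySem.Dict.modify d (pvSlug entry) [] (fun l => insertSortedUnique l (pvArmy entry)))
    PySem.Dict.empty
  let systems := PySem.List.sorted d.keys (fun s => SYSTEM_LABELS.getD s s) false
  (systems, d.items)

-- ===== PRECONDITION & SPEC =====
def Spec_get_systems_and_armies (data : List (List (String × String))) (out : List String × (List (String × List String))) : Prop := out = get_systems_and_armies_alt data
instance (data : List (List (String × String))) (out : List String × (List (String × List String))) : Decidable (Spec_get_systems_and_armies data out) := by unfold Spec_get_systems_and_armies; infer_instance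

-- ===== CLAIM (what is proved, stated in full; the proofs are below) =====
def Claim_equal_get_systems_and_armies : Prop := ∀ (data : List (List (String × String))), Dom_get_systems_and_armies data → Spec_get_systems_and_armies data (get_systems_and_armies data)

-- ===== LEMMAS AND PROOFS =====

theorem mem_insertSortedUnique (l : List String) (x y : String) :
    y ∈ insertSortedUnique l x ↔ y = x ∨ y ∈ l := by
  induction l with
  | nil => simp [insertSortedUnique]
  | cons h t ih =>
    simp only [insertSortedUnique]
    split_ifs with h1 h2
    · simp [List.mem_cons]
    · subst h2; simp [List.mem_cons]
    · simp only [List.mem_cons, ih]; tauto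

theorem insertSortedUnique_pairwise (l : List String) (x : String)
    (hp : l.Pairwise (· < ·)) : (insertSortedUnique l x).Pairwise (· < ·) := by
  induction l with
  | nil => simp [insertSortedUnique]
  | cons h t ih =>
    rw [List.pairwise_cons] at hp
    simp only [insertSortedUnique]
    split_ifs with h1 h2
    · refine List.Pairwise.cons ?_ (List.Pairwise.cons hp.1 hp.2)
      intro y hy
      rcases List.mem_cons.mp hy with rfl | hy
      · exact h1
      · exact lt_trans h1 (hp.1 y hy)
    · exact List.Pairwise.cons hp.1 hp.2
    · refine List.Pairwise.cons ?_ (ih hp.2)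
      intro y hy
      rcases (mem_insertSortedUnique t x y).mp hy with rfl | hy
      · rcases lt_trichotomy y h with h3 | h3 | h3
        · exact absurd h3 h1
        · exact absurd h3 h2
        · exact h3
      · exact hp.1 y hy

theorem insertSortedUnique_eq_of_mem (l : List String) (x : String)
    (hp : l.Pairwise (· < ·)) (hx : x ∈ l) : insertSortedUnique l x = l := by
  induction l with
  | nil => cases hx
  | cons h t ih =>
    rw [List.pairwise_cons] at hp
    simp only [insertSortedUnique]
    rcases List.mem_cons.mp hx with rfl | hx
    · simp
    · have hlt : h < x := hp.1 x hx
      rw [if_neg (fun h1 => lt_irrefl x (lt_trans h1 hlt)),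
          if_neg (by rintro rfl; exact lt_irrefl x hlt), ih hp.2 hx]

theorem insertSortedUnique_perm_of_not_mem (l : List String) (x : String)
    (hx : x ∉ l) : (insertSortedUnique l x).Perm (x :: l) := by
  induction l with
  | nil => simp [insertSortedUnique]
  | cons h t ih =>
    simp only [insertSortedUnique]
    have hxh : x ≠ h := fun h1 => hx (h1 ▸ List.mem_cons_self)
    by_cases h1 : x < h
    · rw [if_pos h1]
    · rw [if_neg h1, if_neg hxh]
      exact (List.Perm.cons h (ih (fun h1 => hx (List.mem_cons_of_mem _ h1)))).trans
        (List.Perm.swap x h t)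

theorem sorted_set_add (s : List String) (x : String) (hnd : s.Nodup) :
    PySem.List.sorted (PySem.Set.add s x) (fun y => y) false
      = insertSortedUnique (PySem.List.sorted s (fun y => y) false) x := by
  have hperm : (PySem.List.sorted s (fun y => y) false).Perm s := PySem.List.sorted_perm s (fun y => y) false
  have hndL : (PySem.List.sorted s (fun y => y) false).Nodup := (hperm.nodup_iff).mpr hnd
  have hle : (PySem.List.sorted s (fun y => y) false).Pairwise (fun a b => a ≤ b) :=
    PySem.List.sorted_pairwise s (fun y => y)
  have hlt : (PySem.List.sorted s (fun y => y) false).Pairwise (· < ·) :=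
    (hle.and hndL).imp (fun h => lt_of_le_of_ne h.1 h.2)
  by_cases hx : x ∈ s
  · have hadd : PySem.Set.add s x = s := by simp [PySem.Set.add, hx]
    rw [hadd, insertSortedUnique_eq_of_mem _ _ hlt (hperm.mem_iff.mpr hx)]
  · have hadd : PySem.Set.add s x = s ++ [x] := by simp [PySem.Set.add, hx]
    rw [hadd]
    apply PySem.List.sorted_eq_of_perm_of_pairwise_lt
    · exact (insertSortedUnique_perm_of_not_mem _ x
        (fun h1 => hx (hperm.mem_iff.mp h1))).trans
        ((hperm.cons x).trans (List.perm_append_singleton x s).symm)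
    · exact insertSortedUnique_pairwise _ x hlt

theorem main_val (as : List String) (s : List String) (hnd : s.Nodup) :
    PySem.List.sorted (as.foldl PySem.Set.add s) (fun y => y) false
      = as.foldl insertSortedUnique (PySem.List.sorted s (fun y => y) false) := by
  induction as generalizing s with
  | nil => rfl
  | cons a t ih =>
    simp only [List.foldl_cons]
    rw [ih (PySem.Set.add s a) (PySem.Set.nodup_add s a hnd), sorted_set_add s a hnd]

theorem getD_foldl_modify_key_filter {β : Type} (l : List β) (key : β → String)
    (f : β → List String → List String) (d0 : List String)
    (d : PySem.Dict String (List String)) (k : String) :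
    (l.foldl (fun d p => PySem.Dict.modify d (key p) d0 (f p)) d).getD k d0
      = (l.filter (fun p => key p == k)).foldl (fun v p => f p v) (d.getD k d0) := by
  induction l generalizing d with
  | nil => rfl
  | cons p t ih =>
    simp only [List.foldl_cons, List.filter_cons]
    by_cases h : key p = k
    · simp only [h, beq_self_eq_true, if_pos, List.foldl_cons]
      rw [ih]
      congr 1
      rw [PySem.Dict.getD_modify, if_pos rfl]
    · rw [if_neg (by simpa using h), ih]
      congr 1
      rw [PySem.Dict.getD_modify, if_neg (fun h1 => h h1.symm)]

theorem set_update_self (s : List String) (xs : List String) (h : ∀ x ∈ xs, x ∈ s) :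
    PySem.Set.update s xs = s := by
  induction xs generalizing s with
  | nil => rfl
  | cons x t ih =>
    have : PySem.Set.add s x = s := by
      simp [PySem.Set.add, h x List.mem_cons_self]
    simp only [PySem.Set.update, List.foldl_cons] at *
    rw [this]
    exact ih s (fun y hy => h y (List.mem_cons_of_mem _ hy))

theorem getD_sortPass (ks : List String) (d : PySem.Dict String (List String)) (k : String)
    (h : ks.Nodup) :
    (ks.foldl (fun acc k' => acc.insert k' (PySem.List.sorted (acc.getD k' []) (fun x => x) false)) d).getD k []
      = if k ∈ ks then PySem.List.sorted (d.getD k []) (fun x => x) false else d.getD k [] := by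
  induction ks generalizing d with
  | nil => simp
  | cons k0 t ih =>
    rw [List.nodup_cons] at h
    simp only [List.foldl_cons]
    rw [ih _ h.2, PySem.Dict.getD_insert]
    by_cases hk : k ∈ t
    · have : k ≠ k0 := fun h1 => h.1 (h1 ▸ hk)
      simp [hk, this]
    · by_cases hk0 : k = k0
      · simp [hk0]
      · simp [hk0]

-- ===== VERDICT (by name: the statement is the Claim_ definition above) =====
theorem get_systems_and_armies_spec : Claim_equal_get_systems_and_armies := by
  intro data _
  unfold Spec_get_systems_and_armies
  show get_systems_and_armies data = get_systems_and_armies_alt data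
  have hSE : (PySem.Set.empty : List String) = [] := rfl
  unfold get_systems_and_armies get_systems_and_armies_alt
  simp only [hSE]
  set dA := data.foldl
    (fun d entry => PySem.Dict.modify d (pvSlug entry) [] (fun s => PySem.Set.add s (pvArmy entry)))
    PySem.Dict.empty with hdA
  set dB := data.foldl
    (fun d entry => PySem.Dict.modify d (pvSlug entry) [] (fun l => insertSortedUnique l (pvArmy entry)))
    PySem.Dict.empty with hdB
  set d2 := dA.keys.foldl
    (fun acc k => acc.insert k (PySem.List.sorted (acc.getD k []) (fun x => x) false)) dA with hd2
  have hkeysAB : dA.keys = dB.keys := by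
    rw [hdA, hdB, PySem.Dict.keys_foldl_modify_key, PySem.Dict.keys_foldl_modify_key]
  have hndA : dA.keys.Nodup := by
    rw [hdA]
    exact PySem.Dict.nodup_keys_foldl_modify_key _ _ _ _ _ PySem.Dict.nodup_keys_empty
  have hndB : dB.keys.Nodup := hkeysAB ▸ hndA
  have hval : ∀ k, PySem.List.sorted (dA.getD k []) (fun x => x) false = dB.getD k [] := by
    intro k
    rw [hdA, hdB,
        getD_foldl_modify_key_filter data pvSlug (fun p s => PySem.Set.add s (pvArmy p)) [] PySem.Dict.empty k,
        getD_foldl_modify_key_filter data pvSlug (fun p l => insertSortedUnique l (pvArmy p)) [] PySem.Dict.empty k]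
    have h := main_val ((data.filter (fun p => pvSlug p == k)).map pvArmy) [] List.nodup_nil
    simp only [List.foldl_map] at h
    simpa using h
  have hkeys2 : d2.keys = dA.keys := by
    rw [hd2, PySem.Dict.keys_foldl_insert]
    exact set_update_self _ _ (fun x hx => hx)
  have hnd2 : d2.keys.Nodup := hkeys2 ▸ hndA
  have hitems : d2.items = dB.items := by
    rw [PySem.Dict.items_eq_map_keys d2 hnd2 [], PySem.Dict.items_eq_map_keys dB hndB [],
        hkeys2, hkeysAB]
    apply List.map_congr_left
    intro k hk
    rw [hd2, getD_sortPass dA.keys dA k hndA, if_pos (hkeysAB ▸ hk), hval k]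
  rw [Prod.mk.injEq]
  exact ⟨by rw [hkeys2, hkeysAB], hitems⟩
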